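-- pv_equiv track=rewrite | github.com/kenvenner/AuditETL | auditcsv.py | cnt_field_filled
-- ===== SOURCE A (Python) =====
-- def cnt_field_filled( csvfile ):
--     header = csvfile[0].keys()
--
--     # something weird happens when I build the dict this way - not sure why
--     #fldPopulated = dict.fromkeys( header, { 'cnt_in' : 0, 'cnt_notin' : 0 } )
--
--     # the math works when I build via brute force.
--     fldPopulated = {}
--     for fld in header:
--         fldPopulated[fld] = { 'cnt_in' : 0, 'cnt_notin' : 0 }
--
--     for csvevent in csvfile:
--         for fld in header:
--             if csvevent[fld]:
--                 updtfld = 'cnt_in'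
--             else:
--                 updtfld = 'cnt_notin'
--             fldPopulated[fld][updtfld] +=1
--
--     return fldPopulated
-- ===== SOURCE B (Python) =====
-- def cnt_field_filled(csvfile):
--     header = csvfile[0].keys()
--     n = len(csvfile)
--     fldPopulated = {}
--     for fld in header:
--         cnt_in = sum(1 for row in csvfile if row[fld])
--         fldPopulated[fld] = {'cnt_in': cnt_in, 'cnt_notin': n - cnt_in}
--     return fldPopulated
-- ===== Notes on version B (the rewrite author's own statement) =====
-- stated objective: simpler
-- what changed: B traverses column-major: for each header field it counts the filled cells in one pass and derives the empty count by subtraction from len(csvfile), instead of A's row-major loop that branches on every cell and increments a pre-built nested counter dict.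
import Mathlib
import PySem

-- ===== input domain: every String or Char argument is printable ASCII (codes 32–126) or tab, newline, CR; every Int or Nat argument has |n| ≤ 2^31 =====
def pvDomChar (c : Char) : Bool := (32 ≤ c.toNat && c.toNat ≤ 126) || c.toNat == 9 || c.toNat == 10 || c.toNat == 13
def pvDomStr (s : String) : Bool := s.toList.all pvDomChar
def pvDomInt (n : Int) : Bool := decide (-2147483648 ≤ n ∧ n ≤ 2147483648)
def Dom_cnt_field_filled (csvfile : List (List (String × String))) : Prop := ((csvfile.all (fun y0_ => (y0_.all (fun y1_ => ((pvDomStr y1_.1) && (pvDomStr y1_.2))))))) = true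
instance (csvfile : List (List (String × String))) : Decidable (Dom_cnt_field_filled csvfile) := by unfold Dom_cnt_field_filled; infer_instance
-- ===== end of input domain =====

-- B counts each column's filled cells in one pass and derives the empty count by subtraction,
-- instead of A's row-major loop branching per cell into a pre-built nested counter dict (same cost, simpler).


-- ===== PORT A =====
def cnt_field_filled (csvfile : List (List (String × String))) : List (String × List (String × Int)) :=
  -- header = csvfile[0].keys()  (Python raises IndexError on empty csvfile; excluded by Pre_)
  let header : List String := match csvfile with
    | [] => []
    | r :: _ => PySem.Dict.keys ⟨r⟩
  let fldPopulated : PySem.Dict String (PySem.Dict String Int) :=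
    header.foldl (fun d fld => PySem.Dict.insert d fld ⟨[("cnt_in", 0), ("cnt_notin", 0)]⟩) PySem.Dict.empty
  -- for csvevent in csvfile: for fld in header: fldPopulated[fld][updtfld] += 1
  -- csvevent[fld] would raise KeyError if fld were missing; Pre_ guarantees presence, so getD is exact there
  let final := csvfile.foldl (fun d csvevent =>
    header.foldl (fun d fld =>
      let updtfld : String := if PySem.Dict.getD ⟨csvevent⟩ fld "" ≠ "" then "cnt_in" else "cnt_notin"
      PySem.Dict.modify d fld PySem.Dict.empty (fun inner => PySem.Dict.modify inner updtfld 0 (· + 1))) d) fldPopulated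
  final.items.map (fun p => (p.1, p.2.items))

-- ===== PORT B =====
def cnt_field_filled_alt (csvfile : List (List (String × String))) : List (String × List (String × Int)) :=
  let header : List String := match csvfile with
    | [] => []
    | r :: _ => PySem.Dict.keys ⟨r⟩
  let n : Int := (csvfile.length : Int)
  let fldPopulated : PySem.Dict String (List (String × Int)) :=
    header.foldl (fun out fld =>
      let cnt_in : Int := ((csvfile.filter (fun row => PySem.Dict.getD ⟨row⟩ fld "" ≠ "")).length : Int)
      PySem.Dict.insert out fld [("cnt_in", cnt_in), ("cnt_notin", n - cnt_in)]) PySem.Dict.empty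
  fldPopulated.items

-- ===== PRECONDITION & SPEC =====
-- Pre_ excludes exactly: the empty list (A raises IndexError on csvfile[0]), rows missing a key of the
-- first row (A raises KeyError on csvevent[fld]), and rows whose association list repeats a key, which a
-- Python dict cannot represent.
def Pre_cnt_field_filled (csvfile : List (List (String × String))) : Prop :=
  csvfile ≠ [] ∧ ∀ row ∈ csvfile, (row.map Prod.fst).Nodup ∧
    ∀ fld ∈ (csvfile.headD []).map Prod.fst, fld ∈ row.map Prod.fst
instance (csvfile : List (List (String × String))) : Decidable (Pre_cnt_field_filled csvfile) := by
  unfold Pre_cnt_field_filled; infer_instance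

def pvWitness_cnt_field_filled : (List (List (String × String))) :=
  [[("a", "x"), ("b", "")], [("a", ""), ("b", "y")]]

def Spec_cnt_field_filled (csvfile : List (List (String × String))) (out : List (String × List (String × Int))) : Prop := out = cnt_field_filled_alt csvfile
instance (csvfile : List (List (String × String))) (out : List (String × List (String × Int))) : Decidable (Spec_cnt_field_filled csvfile out) := by unfold Spec_cnt_field_filled; infer_instance

-- ===== CLAIM (what is proved, stated in full; the proofs are below) =====
def Claim_equal_cnt_field_filled : Prop := ∀ (csvfile : List (List (String × String))), Dom_cnt_field_filled csvfile → Pre_cnt_field_filled csvfile → Spec_cnt_field_filled csvfile (cnt_field_filled csvfile)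

-- ===== LEMMAS AND PROOFS =====
lemma pv_modify_present {ν : Type} (d0 : ν) (g : ν → ν) (pre tail : List (String × ν)) (fld : String) (v : ν)
    (hpre : ∀ p ∈ pre, p.1 ≠ fld) (htail : ∀ p ∈ tail, p.1 ≠ fld) :
    PySem.Dict.modify ⟨pre ++ (fld, v) :: tail⟩ fld d0 g = ⟨pre ++ (fld, g v) :: tail⟩ := by
  have hfind : List.find? (fun p => p.1 == fld) pre = none :=
    List.find?_eq_none.mpr (by intro p hp; simpa using hpre p hp)
  have hany : pre.any (fun p => p.1 == fld) = false := by
    simp only [List.any_eq_false]; intro p hp; simpa using hpre p hp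
  have h1 : List.map (fun p => if p.1 = fld then (fld, g v) else p) pre = pre := by
    conv_rhs => rw [← List.map_id pre]
    apply List.map_congr_left; intro p hp; simp [hpre p hp]
  have h2 : List.map (fun p => if p.1 = fld then (fld, g v) else p) tail = tail := by
    conv_rhs => rw [← List.map_id tail]
    apply List.map_congr_left; intro p hp; simp [htail p hp]
  simp [PySem.Dict.modify, PySem.Dict.insert, PySem.Dict.getD, PySem.Dict.get?, PySem.Dict.contains,
        List.find?_append, hfind, hany, List.map_append, h1, h2]

lemma pv_foldl_modify_map {ν : Type} (d0 : ν) (g : String → ν → ν) :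
    ∀ (hdr : List String) (pre : List (String × ν)) (inner : String → ν),
    (pre.map Prod.fst ++ hdr).Nodup →
    hdr.foldl (fun d fld => PySem.Dict.modify d fld d0 (g fld)) ⟨pre ++ hdr.map (fun k => (k, inner k))⟩
      = ⟨pre ++ hdr.map (fun k => (k, g k (inner k)))⟩ := by
  intro hdr
  induction hdr with
  | nil => intro pre inner h; simp
  | cons fld rest ih =>
    intro pre inner h
    have hfld_pre : ∀ p ∈ pre, p.1 ≠ fld := by
      intro p hp hc
      exact (List.nodup_append.mp h).2.2 p.1 (List.mem_map.mpr ⟨p, hp, rfl⟩) fld List.mem_cons_self hc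
    have hfld_rest : fld ∉ rest := by
      have := (List.nodup_append.mp h).2.1
      exact (List.nodup_cons.mp this).1
    simp only [List.foldl_cons, List.map_cons]
    rw [pv_modify_present d0 (g fld) pre (rest.map (fun k => (k, inner k))) fld (inner fld) hfld_pre
        (by intro p hp; obtain ⟨k, hk, rfl⟩ := List.mem_map.mp hp; simp; rintro rfl; exact hfld_rest hk)]
    have hassoc : pre ++ (fld, g fld (inner fld)) :: rest.map (fun k => (k, inner k))
        = (pre ++ [(fld, g fld (inner fld))]) ++ rest.map (fun k => (k, inner k)) := by simp
    rw [hassoc, ih (pre ++ [(fld, g fld (inner fld))]) inner (by simpa using h)]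
    simp

lemma pv_outer_fold (header : List String) (hnd : header.Nodup) :
    ∀ (l : List (List (String × String))) (inner : String → PySem.Dict String Int),
    l.foldl (fun d csvevent =>
        header.foldl (fun d fld =>
          PySem.Dict.modify d fld PySem.Dict.empty
            (fun i => PySem.Dict.modify i (if PySem.Dict.getD ⟨csvevent⟩ fld "" ≠ "" then "cnt_in" else "cnt_notin") 0 (· + 1))) d)
      ⟨header.map (fun k => (k, inner k))⟩
      = ⟨header.map (fun k => (k,
          l.foldl (fun acc csvevent =>
            PySem.Dict.modify acc (if PySem.Dict.getD ⟨csvevent⟩ k "" ≠ "" then "cnt_in" else "cnt_notin") 0 (· + 1)) (inner k)))⟩ := by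
  intro l
  induction l with
  | nil => intro inner; simp
  | cons row rest ih =>
    intro inner
    simp only [List.foldl_cons]
    have hstep := pv_foldl_modify_map PySem.Dict.empty
        (fun fld i => PySem.Dict.modify i (if PySem.Dict.getD ⟨row⟩ fld "" ≠ "" then "cnt_in" else "cnt_notin") 0 (· + 1))
        header [] inner (by simpa using hnd)
    simp only [List.nil_append] at hstep
    rw [hstep]
    exact ih _

lemma pv_inner_count (k : String) :
    ∀ (l : List (List (String × String))) (a b : Int),
    l.foldl (fun acc csvevent =>
        PySem.Dict.modify acc (if PySem.Dict.getD ⟨csvevent⟩ k "" ≠ "" then "cnt_in" else "cnt_notin") 0 (· + 1))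
      ⟨[("cnt_in", a), ("cnt_notin", b)]⟩
      = ⟨[("cnt_in", a + ((l.filter (fun row => PySem.Dict.getD ⟨row⟩ k "" ≠ "")).length : Int)),
          ("cnt_notin", b + ((l.length : Int) - ((l.filter (fun row => PySem.Dict.getD ⟨row⟩ k "" ≠ "")).length : Int)))]⟩ := by
  intro l
  induction l with
  | nil => intro a b; simp
  | cons row rest ih =>
    intro a b
    simp only [List.foldl_cons, List.filter_cons, List.length_cons]
    by_cases hrow : PySem.Dict.getD (⟨row⟩ : PySem.Dict String String) k "" ≠ ""
    · have hm : PySem.Dict.modify (⟨[("cnt_in", a), ("cnt_notin", b)]⟩ : PySem.Dict String Int) "cnt_in" 0 (· + 1)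
          = ⟨[("cnt_in", a + 1), ("cnt_notin", b)]⟩ := by
        simp [PySem.Dict.modify, PySem.Dict.insert, PySem.Dict.getD, PySem.Dict.get?, PySem.Dict.contains]
      rw [if_pos hrow, hm, ih]
      simp [hrow]
      omega
    · have hm : PySem.Dict.modify (⟨[("cnt_in", a), ("cnt_notin", b)]⟩ : PySem.Dict String Int) "cnt_notin" 0 (· + 1)
          = ⟨[("cnt_in", a), ("cnt_notin", b + 1)]⟩ := by
        simp [PySem.Dict.modify, PySem.Dict.insert, PySem.Dict.getD, PySem.Dict.get?, PySem.Dict.contains]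
      rw [if_neg hrow, hm, ih]
      simp [hrow]
      omega

-- ===== VERDICT (by name: the statement is the Claim_ definition above) =====
theorem cnt_field_filled_spec : Claim_equal_cnt_field_filled := by
  intro csvfile hdom hpre
  unfold Spec_cnt_field_filled
  obtain ⟨hne, hrows⟩ := hpre
  obtain ⟨r, rest, rfl⟩ := List.exists_cons_of_ne_nil hne
  have hnd : (r.map Prod.fst).Nodup := (hrows r (by simp)).1
  unfold cnt_field_filled cnt_field_filled_alt
  simp only [PySem.Dict.keys]
  have hinit : ((r.map Prod.fst).foldl
      (fun d fld => PySem.Dict.insert d fld (⟨[("cnt_in", 0), ("cnt_notin", 0)]⟩ : PySem.Dict String Int))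
      PySem.Dict.empty)
      = ⟨(r.map Prod.fst).map (fun k => (k, (⟨[("cnt_in", 0), ("cnt_notin", 0)]⟩ : PySem.Dict String Int)))⟩ := by
    apply PySem.Dict.ext
    rw [PySem.Dict.items_foldl_insert_fresh (r.map Prod.fst) (fun a => a)
        (fun _ => (⟨[("cnt_in", 0), ("cnt_notin", 0)]⟩ : PySem.Dict String Int)) PySem.Dict.empty
        (by intro a _; simp [PySem.Dict.contains, PySem.Dict.empty]) (by simpa using hnd)]
    simp [PySem.Dict.empty]
  have hb : ((r.map Prod.fst).foldl
      (fun out fld => PySem.Dict.insert out fld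
        [("cnt_in", (((r :: rest).filter (fun row => PySem.Dict.getD ⟨row⟩ fld "" ≠ "")).length : Int)),
         ("cnt_notin", ((r :: rest).length : Int) - (((r :: rest).filter (fun row => PySem.Dict.getD ⟨row⟩ fld "" ≠ "")).length : Int))])
      PySem.Dict.empty).items
      = (r.map Prod.fst).map (fun fld => (fld,
          [("cnt_in", (((r :: rest).filter (fun row => PySem.Dict.getD ⟨row⟩ fld "" ≠ "")).length : Int)),
           ("cnt_notin", ((r :: rest).length : Int) - (((r :: rest).filter (fun row => PySem.Dict.getD ⟨row⟩ fld "" ≠ "")).length : Int))])) := by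
    rw [PySem.Dict.items_foldl_insert_fresh (r.map Prod.fst) (fun a => a) _ PySem.Dict.empty
        (by intro a _; simp [PySem.Dict.contains, PySem.Dict.empty]) (by simpa using hnd)]
    simp [PySem.Dict.empty]
  rw [hinit, pv_outer_fold (r.map Prod.fst) hnd (r :: rest)]
  simp only [pv_inner_count]
  rw [hb]
  simp [List.map_map, Function.comp]
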